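-- pv_equiv track=rewrite | github.com/geekosaurusR3x/StargateNetwork | StargateNetwork/Helpers.py | StargateCodeToIp
-- ===== SOURCE A (Python) =====
-- def ListNumbersToIntInBase(l, b):
--     val = 0
--     exp = len(l)-1
--     for digit in l:
--         val += digit*pow(b, exp)
--         exp -= 1
--     return val
--
-- def NumberToBase(n, b):
--     b = int(b)
--     if n == 0:
--         return [0]
--     digits = []
--     while n:
--         digits.append(n % b)
--         n //= b
--     return digits[::-1]
--
-- def StargateCodeToIp(sc):
--     sc = sc[:-1]
--     maxintToShift = ListNumbersToIntInBase([1, 0, 0, 0, 0, 0], 38)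
--     actualint = ListNumbersToIntInBase(sc, 38)
--     sc.insert(0, 0 if (actualint < maxintToShift) else 1)
--     IntIP = ListNumbersToIntInBase(sc, 38)
--     ListIP = NumberToBase(IntIP, 256)
--     while len(ListIP) < 4:
--         ListIP.insert(0, 0)
--     return ListIP
-- ===== SOURCE B (Python) =====
-- def StargateCodeToIp(sc):
--     # Grade-school base-256 limb arithmetic: the IP bytes are produced directly by
--     # carry propagation; no big integer is ever formed and no base conversion runs.
--     code = sc[:-1]
--     acc = []        # little-endian bytes, each in 0..255
--     carry = 0       # signed overflow limb: value = acc + carry * 256**len(acc)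
--     pw = [1]        # little-endian bytes of 38**(number of digits processed)
--     for d in code:
--         # acc := acc * 38 + d, one byte pushed out of the carry each step
--         c = d
--         out = []
--         for x in acc:
--             t = x * 38 + c
--             out.append(t % 256)
--             c = t // 256
--         c = carry * 38 + c
--         out.append(c % 256)
--         carry = c // 256
--         acc = out
--         # pw := pw * 38
--         q = 0
--         npw = []
--         for x in pw:
--             t = x * 38 + q
--             npw.append(t % 256)
--             q = t // 256
--         while q:
--             npw.append(q % 256)
--             q //= 256
--         pw = npw
--     while carry:
--         acc.append(carry % 256)
--         carry //= 256
--     while acc and acc[-1] == 0: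
--         acc.pop()
--     # shift bit: does the value reach 38**5?  (at most 4 bytes to inspect)
--     big = False
--     if len(acc) > 4:
--         big = True
--     elif len(acc) == 4:
--         v = 0
--         for x in reversed(acc):
--             v = v * 256 + x
--         big = v >= 79235168
--     if big:
--         # acc := acc + pw, school addition
--         res = []
--         q = 0
--         for i in range(max(len(acc), len(pw))):
--             t = (acc[i] if i < len(acc) else 0) + (pw[i] if i < len(pw) else 0) + q
--             res.append(t % 256)
--             q = t // 256
--         while q:
--             res.append(q % 256)
--             q //= 256
--         acc = res
--         while acc and acc[-1] == 0:
--             acc.pop()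
--     while len(acc) < 4:
--         acc.append(0)
--     return acc[::-1]
-- ===== Notes on version B (the rewrite author's own statement) =====
-- stated objective: alternative
-- what changed: B replaces A's number pipeline (positional base-38 sum to one big integer, insert-bit rescan, divmod base-256 conversion, pad-front) with grade-school multiprecision arithmetic on little-endian byte vectors: the byte list is the working representation throughout (scalar multiply-by-38 with carry propagation, an incrementally maintained byte vector for 38**len, byte-wise addition for the shift), so the IP bytes fall out of the carries and no base conversion or big-integer value is ever formed.
import Mathlib
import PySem

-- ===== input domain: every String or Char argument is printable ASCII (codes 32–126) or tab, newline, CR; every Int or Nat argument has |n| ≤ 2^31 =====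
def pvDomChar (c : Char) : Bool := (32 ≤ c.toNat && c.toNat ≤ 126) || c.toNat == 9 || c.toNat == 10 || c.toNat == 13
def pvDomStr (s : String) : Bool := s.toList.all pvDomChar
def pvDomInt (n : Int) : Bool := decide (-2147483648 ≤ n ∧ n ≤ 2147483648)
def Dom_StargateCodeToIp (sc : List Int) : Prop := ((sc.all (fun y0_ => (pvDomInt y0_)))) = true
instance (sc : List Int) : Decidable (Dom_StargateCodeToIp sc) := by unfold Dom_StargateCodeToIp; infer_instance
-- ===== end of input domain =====

-- B computes the IP bytes by grade-school base-256 limb arithmetic (carry propagation on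
-- byte vectors), never forming the big integer or converting a number between bases.
-- ===== PORT A =====
-- A's ListNumbersToIntInBase: positional sum with a decreasing exponent.
def pvListNumbersToIntInBase (l : List Int) (b : Int) : Int :=
  (l.foldl (fun (s : Int × Int) digit => (s.1 + digit * b ^ s.2.toNat, s.2 - 1))
    (0, (l.length : Int) - 1)).1

-- A's NumberToBase while-loop; fuel n.toNat suffices for b = 256 and n ≥ 0 (the only call).
def pvNtbLoop : Nat → Int → Int → List Int → List Int
  | 0, _, _, digits => digits
  | fuel + 1, n, b, digits =>
    if n = 0 then digits
    else pvNtbLoop fuel (PySem.Int.floordiv n b) b (digits ++ [PySem.Int.mod n b])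

def pvNumberToBase (n b : Int) : List Int :=
  if n = 0 then [0]
  else (pvNtbLoop n.toNat n b []).reverse   -- digits[::-1] = reverse

-- A's padding: while len(ListIP) < 4: ListIP.insert(0, 0)
def pvPadFront (xs : List Int) : List Int :=
  if xs.length < 4 then pvPadFront (PySem.List.insert xs 0 0) else xs
  termination_by 4 - xs.length
  decreasing_by simp [PySem.List.insert_zero]; omega

def StargateCodeToIp (sc : List Int) : List Int :=
  let sc' := PySem.List.slice sc none (some (-1))
  let maxintToShift := pvListNumbersToIntInBase [1, 0, 0, 0, 0, 0] 38
  let actualint := pvListNumbersToIntInBase sc' 38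
  let sc'' := PySem.List.insert sc' 0 (if actualint < maxintToShift then 0 else 1)
  let intIP := pvListNumbersToIntInBase sc'' 38
  pvPadFront (pvNumberToBase intIP 256)

-- ===== PORT B =====
-- the 'for x in limbs: t = x*38+c; out.append(t%256); c = t//256' pass of Source B
def pvMulPass : List Int → Int → List Int × Int
  | [], c => ([], c)
  | x :: t, c =>
    let r := pvMulPass t (PySem.Int.floordiv (x * 38 + c) 256)
    (PySem.Int.mod (x * 38 + c) 256 :: r.1, r.2)

-- the 'while q: l.append(q%256); q //= 256' loops of Source B; fuel q.toNat suffices for q ≥ 0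
def pvPushCarry : Nat → Int → List Int → List Int
  | 0, _, l => l
  | fuel + 1, q, l =>
    if q = 0 then l
    else pvPushCarry fuel (PySem.Int.floordiv q 256) (l ++ [PySem.Int.mod q 256])

-- the 'while acc and acc[-1] == 0: acc.pop()' loop of Source B
def pvDropTopZeros : List Int → List Int
  | [] => []
  | x :: t => if x = 0 then pvDropTopZeros t else x :: t

def pvStrip (l : List Int) : List Int := (pvDropTopZeros l.reverse).reverse

-- the school-addition 'for i in range(max(len(acc), len(pw)))' loop of Source B
def pvAddPass : List Int → List Int → Int → List Int × Int
  | [], [], q => ([], q)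
  | [], y :: t, q =>
    let r := pvAddPass [] t (PySem.Int.floordiv (y + q) 256)
    (PySem.Int.mod (y + q) 256 :: r.1, r.2)
  | x :: t, [], q =>
    let r := pvAddPass t [] (PySem.Int.floordiv (x + q) 256)
    (PySem.Int.mod (x + q) 256 :: r.1, r.2)
  | x :: s, y :: t, q =>
    let r := pvAddPass s t (PySem.Int.floordiv (x + y + q) 256)
    (PySem.Int.mod (x + y + q) 256 :: r.1, r.2)

-- the body of Source B's main 'for d in code' loop: acc := acc*38 + d, pw := pw*38
def pvStep (st : List Int × Int × List Int) (d : Int) : List Int × Int × List Int :=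
  let p := pvMulPass st.1 d
  let c := st.2.1 * 38 + p.2
  let acc' := p.1 ++ [PySem.Int.mod c 256]
  let carry' := PySem.Int.floordiv c 256
  let q := pvMulPass st.2.2 0
  let pw' := pvPushCarry q.2.toNat q.2 q.1
  (acc', carry', pw')

def pvPadBack (xs : List Int) : List Int :=
  if xs.length < 4 then pvPadBack (xs ++ [0]) else xs
  termination_by 4 - xs.length
  decreasing_by simp; omega

def StargateCodeToIp_alt (sc : List Int) : List Int :=
  let code := PySem.List.slice sc none (some (-1))
  let st := code.foldl pvStep ([], 0, [1])
  let acc0 := pvStrip (pvPushCarry st.2.1.toNat st.2.1 st.1)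
  let big : Bool :=
    if 4 < acc0.length then true
    else if acc0.length = 4 then
      decide (79235168 ≤ acc0.reverse.foldl (fun v x => v * 256 + x) 0)
    else false
  let acc1 :=
    if big then
      let r := pvAddPass acc0 st.2.2 0
      pvStrip (pvPushCarry r.2.toNat r.2 r.1)
    else acc0
  (pvPadBack acc1).reverse   -- acc[::-1] = reverse

-- ===== PRECONDITION & SPEC =====
-- Pre_ excludes inputs whose trimmed code has a negative base-38 value: there A's
-- NumberToBase while-loop never terminates (n //= 256 stalls at -1), so A returns nothing.
def pvPreVal (l : List Int) : Int := l.foldl (fun v d => v * 38 + d) 0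
def Pre_StargateCodeToIp (sc : List Int) : Prop := 0 ≤ pvPreVal sc.dropLast
instance (sc : List Int) : Decidable (Pre_StargateCodeToIp sc) := by unfold Pre_StargateCodeToIp; infer_instance
def pvWitness_StargateCodeToIp : List Int := [27, 1, 0, 3]

def Spec_StargateCodeToIp (sc : List Int) (out : List Int) : Prop := out = StargateCodeToIp_alt sc
instance (sc : List Int) (out : List Int) : Decidable (Spec_StargateCodeToIp sc out) := by unfold Spec_StargateCodeToIp; infer_instance

-- ===== CLAIM (what is proved, stated in full; the proofs are below) =====
def Claim_equal_StargateCodeToIp : Prop := ∀ (sc : List Int), Dom_StargateCodeToIp sc → Pre_StargateCodeToIp sc → Spec_StargateCodeToIp sc (StargateCodeToIp sc)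

-- ===== LEMMAS AND PROOFS =====

-- little-endian value of a byte vector
def pvVal (l : List Int) : Int := l.foldr (fun x r => x + 256 * r) 0
def pvInRange (l : List Int) : Prop := ∀ x ∈ l, 0 ≤ x ∧ x < 256
def pvCanon (n : Nat) : List Int := (Nat.digits 256 n).map Int.ofNat

theorem pvVal_append (l : List Int) (m : List Int) :
    pvVal (l ++ m) = pvVal l + 256 ^ l.length * pvVal m := by
  induction l with
  | nil => simp [pvVal]
  | cons x t ih => simp [pvVal, List.foldr_append] at ih ⊢; rw [ih]; ring

theorem pvVal_nonneg (l : List Int) (h : pvInRange l) : 0 ≤ pvVal l := by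
  induction l with
  | nil => simp [pvVal]
  | cons x t ih =>
    have hx := h x (by simp)
    have ht : pvInRange t := fun y hy => h y (by simp [hy])
    simp only [pvVal, List.foldr_cons]
    have := ih ht
    simp only [pvVal] at this
    nlinarith

theorem pvVal_lt (l : List Int) (h : pvInRange l) : pvVal l < 256 ^ l.length := by
  induction l with
  | nil => simp [pvVal]
  | cons x t ih =>
    have hx := h x (by simp)
    have ht : pvInRange t := fun y hy => h y (by simp [hy])
    have h1 := ih ht
    simp only [pvVal, List.foldr_cons, List.length_cons] at h1 ⊢
    have : (256:Int) ^ (t.length + 1) = 256 * 256 ^ t.length := by ring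
    rw [this]
    nlinarith

-- big-endian fold equals the little-endian value
theorem pvFoldRev (l : List Int) :
    l.reverse.foldl (fun v x => v * 256 + x) 0 = pvVal l := by
  induction l with
  | nil => rfl
  | cons x t ih =>
    simp only [List.reverse_cons, List.foldl_append, List.foldl_cons, List.foldl_nil, ih, pvVal,
      List.foldr_cons]
    ring

-- divmod split of an Int by the positive literal 256
theorem pvSplit (c : Int) : PySem.Int.mod c 256 + 256 * PySem.Int.floordiv c 256 = c := by
  have := PySem.Int.floordiv_mul_add_mod c 256
  linarith

theorem pvModRange (c : Int) : 0 ≤ PySem.Int.mod c 256 ∧ PySem.Int.mod c 256 < 256 := by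
  rw [PySem.Int.mod_eq_emod_of_pos (by norm_num)]
  exact ⟨Int.emod_nonneg c (by norm_num), Int.emod_lt_of_pos c (by norm_num)⟩

-- the multiply-by-38 pass: value, length, range
theorem pvMulPass_spec (l : List Int) (c : Int) (h : pvInRange l) :
    pvInRange (pvMulPass l c).1 ∧ (pvMulPass l c).1.length = l.length ∧
      pvVal (pvMulPass l c).1 + (pvMulPass l c).2 * 256 ^ l.length = 38 * pvVal l + c := by
  induction l generalizing c with
  | nil => simp [pvMulPass, pvVal, pvInRange]
  | cons x t ih =>
    have ht : pvInRange t := fun y hy => h y (by simp [hy])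
    obtain ⟨r1, r2, r3⟩ := ih (PySem.Int.floordiv (x * 38 + c) 256) ht
    have hs := pvSplit (x * 38 + c)
    have hm := pvModRange (x * 38 + c)
    refine ⟨?_, ?_, ?_⟩
    · intro y hy
      simp only [pvMulPass, List.mem_cons] at hy
      rcases hy with rfl | hy
      · exact hm
      · exact r1 y hy
    · simp only [pvMulPass, List.length_cons, r2]
    · simp only [pvMulPass, pvVal, List.foldr_cons, List.length_cons]
      simp only [pvVal] at r3
      have hpow : (256:Int) ^ (t.length + 1) = 256 * 256 ^ t.length := by ring
      rw [hpow]
      linear_combination hs + 256 * r3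

theorem pvMulPass_carry_nonneg (l : List Int) (c : Int) (hl : ∀ x ∈ l, 0 ≤ x) (hc : 0 ≤ c) :
    0 ≤ (pvMulPass l c).2 := by
  induction l generalizing c with
  | nil => simpa [pvMulPass] using hc
  | cons x t ih =>
    have hx := hl x (by simp)
    have ht : ∀ y ∈ t, 0 ≤ y := fun y hy => hl y (by simp [hy])
    have hc' : 0 ≤ PySem.Int.floordiv (x * 38 + c) 256 := by
      rw [PySem.Int.floordiv_eq_ediv_of_pos (by norm_num)]
      exact Int.ediv_nonneg (by nlinarith) (by norm_num)
    simpa only [pvMulPass] using ih (PySem.Int.floordiv (x * 38 + c) 256) ht hc'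

-- carry normalisation: fuel q.toNat suffices for q ≥ 0
theorem pvPushCarry_spec (fuel : Nat) (q : Int) (l : List Int)
    (hq : 0 ≤ q) (hf : q.toNat ≤ fuel) (h : pvInRange l) :
    pvInRange (pvPushCarry fuel q l) ∧
      pvVal (pvPushCarry fuel q l) = pvVal l + q * 256 ^ l.length := by
  induction fuel generalizing q l with
  | zero =>
    have : q = 0 := by omega
    subst this
    simpa [pvPushCarry] using h
  | succ f ih =>
    by_cases h0 : q = 0
    · subst h0
      simpa [pvPushCarry] using h
    · rw [pvPushCarry, if_neg h0]
      have hq1 : 1 ≤ q := lt_of_le_of_ne hq (Ne.symm h0)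
      have hm := pvModRange q
      have hdnn : 0 ≤ PySem.Int.floordiv q 256 := by
        rw [PySem.Int.floordiv_eq_ediv_of_pos (by norm_num)]
        exact Int.ediv_nonneg hq (by norm_num)
      have hdec : (PySem.Int.floordiv q 256).toNat ≤ f := by
        rw [PySem.Int.floordiv_eq_ediv_of_pos (by norm_num)]
        have hq0 : q = ((q.toNat : Nat) : Int) := by omega
        omega
      have h' : pvInRange (l ++ [PySem.Int.mod q 256]) := by
        intro y hy
        rcases List.mem_append.mp hy with hy | hy
        · exact h y hy
        · simp only [List.mem_singleton] at hy
          subst hy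
          exact hm
      obtain ⟨w1, w2⟩ := ih (PySem.Int.floordiv q 256) (l ++ [PySem.Int.mod q 256]) hdnn hdec h'
      refine ⟨w1, ?_⟩
      rw [w2, pvVal_append]
      have hs := pvSplit q
      simp only [pvVal, List.foldr_cons, List.foldr_nil, List.length_append,
        List.length_singleton]
      have hpow : (256:Int) ^ (l.length + 1) = 256 ^ l.length * 256 := by ring
      rw [hpow]
      linear_combination (256:Int) ^ l.length * hs

-- school addition: value, range, small carry
theorem pvAddPass_spec (a b : List Int) (q : Int) (ha : pvInRange a) (hb : pvInRange b)
    (hq : 0 ≤ q ∧ q ≤ 1) :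
    pvInRange (pvAddPass a b q).1 ∧ (0 ≤ (pvAddPass a b q).2 ∧ (pvAddPass a b q).2 ≤ 1) ∧
      pvVal (pvAddPass a b q).1 + (pvAddPass a b q).2 * 256 ^ (pvAddPass a b q).1.length
        = pvVal a + pvVal b + q := by
  induction a generalizing b q with
  | nil =>
    induction b generalizing q with
    | nil =>
      simp only [pvAddPass, pvVal, List.foldr_nil, List.length_nil, pow_zero, mul_one]
      exact ⟨fun y hy => absurd hy (List.not_mem_nil), hq, by ring⟩
    | cons y t ihb =>
      have hy := hb y (by simp)
      have ht : pvInRange t := fun z hz => hb z (by simp [hz])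
      have hm := pvModRange (y + q)
      have hs := pvSplit (y + q)
      have hq' : 0 ≤ PySem.Int.floordiv (y + q) 256 ∧ PySem.Int.floordiv (y + q) 256 ≤ 1 := by
        constructor
        · rw [PySem.Int.floordiv_eq_ediv_of_pos (by norm_num)]
          exact Int.ediv_nonneg (by omega) (by norm_num)
        · nlinarith [hs, hm.1, hm.2]
      obtain ⟨w1, w2, w3⟩ := ihb (PySem.Int.floordiv (y + q) 256) ht hq'
      refine ⟨?_, by simpa only [pvAddPass] using w2, ?_⟩
      · intro z hz
        simp only [pvAddPass, List.mem_cons] at hz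
        rcases hz with rfl | hz
        · exact hm
        · exact w1 z hz
      · simp only [pvAddPass, pvVal, List.foldr_cons, List.length_cons]
        simp only [pvVal] at w3
        have hpow : (256:Int) ^ ((pvAddPass ([]:List Int) t (PySem.Int.floordiv (y + q) 256)).1.length + 1)
            = 256 * 256 ^ (pvAddPass ([]:List Int) t (PySem.Int.floordiv (y + q) 256)).1.length := by ring
        rw [hpow]
        simp only [List.foldr_nil] at w3 ⊢
        linear_combination hs + 256 * w3
  | cons x s iha =>
    have hx := ha x (by simp)
    have hs' : pvInRange s := fun z hz => ha z (by simp [hz])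
    cases b with
    | nil =>
      have hm := pvModRange (x + q)
      have hdiv := pvSplit (x + q)
      have hq' : 0 ≤ PySem.Int.floordiv (x + q) 256 ∧ PySem.Int.floordiv (x + q) 256 ≤ 1 := by
        constructor
        · rw [PySem.Int.floordiv_eq_ediv_of_pos (by norm_num)]
          exact Int.ediv_nonneg (by omega) (by norm_num)
        · nlinarith [hdiv, hm.1, hm.2]
      obtain ⟨w1, w2, w3⟩ := iha [] (PySem.Int.floordiv (x + q) 256) hs'
        (fun z hz => absurd hz (List.not_mem_nil)) hq'
      refine ⟨?_, by simpa only [pvAddPass] using w2, ?_⟩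
      · intro z hz
        simp only [pvAddPass, List.mem_cons] at hz
        rcases hz with rfl | hz
        · exact hm
        · exact w1 z hz
      · simp only [pvAddPass, pvVal, List.foldr_cons, List.foldr_nil, List.length_cons]
        simp only [pvVal] at w3
        have hpow : (256:Int) ^ ((pvAddPass s [] (PySem.Int.floordiv (x + q) 256)).1.length + 1)
            = 256 * 256 ^ (pvAddPass s [] (PySem.Int.floordiv (x + q) 256)).1.length := by ring
        rw [hpow]
        simp only [List.foldr_nil] at w3 ⊢
        linear_combination hdiv + 256 * w3
    | cons y t =>
      have hy := hb y (by simp)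
      have ht : pvInRange t := fun z hz => hb z (by simp [hz])
      have hm := pvModRange (x + y + q)
      have hdiv := pvSplit (x + y + q)
      have hq' : 0 ≤ PySem.Int.floordiv (x + y + q) 256 ∧ PySem.Int.floordiv (x + y + q) 256 ≤ 1 := by
        constructor
        · rw [PySem.Int.floordiv_eq_ediv_of_pos (by norm_num)]
          exact Int.ediv_nonneg (by omega) (by norm_num)
        · nlinarith [hdiv, hm.1, hm.2]
      obtain ⟨w1, w2, w3⟩ := iha t (PySem.Int.floordiv (x + y + q) 256) hs' ht hq'
      refine ⟨?_, by simpa only [pvAddPass] using w2, ?_⟩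
      · intro z hz
        simp only [pvAddPass, List.mem_cons] at hz
        rcases hz with rfl | hz
        · exact hm
        · exact w1 z hz
      · simp only [pvAddPass, pvVal, List.foldr_cons, List.length_cons]
        simp only [pvVal] at w3
        have hpow : (256:Int) ^ ((pvAddPass s t (PySem.Int.floordiv (x + y + q) 256)).1.length + 1)
            = 256 * 256 ^ (pvAddPass s t (PySem.Int.floordiv (x + y + q) 256)).1.length := by ring
        rw [hpow]
        linear_combination hdiv + 256 * w3

theorem pvDropZeros_fold (m : List Int) :
    (pvDropTopZeros m).foldl (fun v x => v * 256 + x) 0 = m.foldl (fun v x => v * 256 + x) 0 := by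
  induction m with
  | nil => rfl
  | cons x t ih =>
    by_cases h : x = 0
    · subst h
      simpa [pvDropTopZeros] using ih
    · simp [pvDropTopZeros, h]

theorem pvDropZeros_subset (m : List Int) : ∀ x ∈ pvDropTopZeros m, x ∈ m := by
  induction m with
  | nil => simp [pvDropTopZeros]
  | cons y t ih =>
    intro x hx
    by_cases h : y = 0
    · subst h
      rw [show pvDropTopZeros (0 :: t) = pvDropTopZeros t from by simp [pvDropTopZeros]] at hx
      exact List.mem_cons_of_mem _ (ih x hx)
    · simpa [pvDropTopZeros, h] using hx

theorem pvDropZeros_head (m : List Int) (y : Int) (r : List Int)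
    (h : pvDropTopZeros m = y :: r) : y ≠ 0 := by
  induction m with
  | nil => simp [pvDropTopZeros] at h
  | cons z t ih =>
    by_cases hz : z = 0
    · subst hz
      simp only [pvDropTopZeros] at h
      exact ih h
    · simp only [pvDropTopZeros, if_neg hz] at h
      injection h with h1 _
      exact h1 ▸ hz

-- stripping top zeros: value preserved, entries preserved, canonical form
theorem pvStrip_val (l : List Int) : pvVal (pvStrip l) = pvVal l := by
  rw [← pvFoldRev, ← pvFoldRev l]
  unfold pvStrip
  rw [List.reverse_reverse, pvDropZeros_fold]

theorem pvStrip_inRange (l : List Int) (h : pvInRange l) : pvInRange (pvStrip l) := by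
  intro x hx
  unfold pvStrip at hx
  rw [List.mem_reverse] at hx
  exact h x (List.mem_reverse.mp (pvDropZeros_subset _ x hx))

theorem pvStrip_getLast (l : List Int) (h : pvStrip l ≠ []) : (pvStrip l).getLast h ≠ 0 := by
  unfold pvStrip at h ⊢
  rw [List.getLast_reverse]
  have hne : pvDropTopZeros l.reverse ≠ [] := by simpa using h
  obtain ⟨y, r, hyr⟩ := List.exists_cons_of_ne_nil hne
  have hy := pvDropZeros_head _ _ _ hyr
  simp [hyr, hy]

theorem pvValMapNat (L : List Nat) :
    pvVal (L.map Int.ofNat) = ((Nat.ofDigits 256 L : Nat) : Int) := by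
  induction L with
  | nil => simp [pvVal]
  | cons x t ih =>
    rw [List.map_cons, Nat.ofDigits_cons]
    show (x : Int) + 256 * pvVal (t.map Int.ofNat) = _
    rw [ih]
    push_cast
    ring

theorem pvMapToNatCast (l : List Int) (h : ∀ x ∈ l, 0 ≤ x) :
    (l.map Int.toNat).map Int.ofNat = l := by
  induction l with
  | nil => rfl
  | cons x t ih =>
    have ih' := ih (fun y hy => h y (List.mem_cons_of_mem _ hy))
    simp only [List.map_cons, Int.ofNat_eq_natCast] at ih' ⊢
    rw [ih', Int.toNat_of_nonneg (h x List.mem_cons_self)]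

-- a stripped in-range byte vector is exactly the base-256 digit list of its value
theorem pvStrip_canon (l : List Int) (h : pvInRange l) :
    pvStrip l = pvCanon (pvVal l).toNat := by
  have hsr := pvStrip_inRange l h
  have hcast : ((pvStrip l).map Int.toNat).map Int.ofNat = pvStrip l :=
    pvMapToNatCast _ (fun x hx => (hsr x hx).1)
  have hlt : ∀ d ∈ (pvStrip l).map Int.toNat, d < 256 := by
    intro d hd
    rw [List.mem_map] at hd
    obtain ⟨x, hx, rfl⟩ := hd
    have := hsr x hx
    omega
  have hlast : ∀ (hne : (pvStrip l).map Int.toNat ≠ []),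
      ((pvStrip l).map Int.toNat).getLast hne ≠ 0 := by
    intro hne
    have hsne : pvStrip l ≠ [] := by
      intro hc
      rw [hc] at hne
      simp at hne
    rw [List.getLast_map]
    have h1 := pvStrip_getLast l hsne
    have h2 := (hsr _ (List.getLast_mem hsne)).1
    omega
  have hdig := Nat.digits_ofDigits 256 (by norm_num) _ hlt hlast
  have hvl : (pvVal l).toNat = Nat.ofDigits 256 ((pvStrip l).map Int.toNat) := by
    have hv2 : pvVal l = ((Nat.ofDigits 256 ((pvStrip l).map Int.toNat) : Nat) : Int) := by
      rw [← pvStrip_val l]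
      conv_lhs => rw [← hcast]
      exact pvValMapNat _
    rw [hv2]
    exact Int.toNat_natCast _
  rw [pvCanon, hvl, hdig, hcast]

theorem pvCanon_val (n : Nat) : pvVal (pvCanon n) = (n : Int) := by
  rw [pvCanon, pvValMapNat, Nat.ofDigits_digits]

theorem pvCanon_inRange (n : Nat) : pvInRange (pvCanon n) := by
  intro x hx
  rw [pvCanon, List.mem_map] at hx
  obtain ⟨d, hd, rfl⟩ := hx
  have := Nat.digits_lt_base (by norm_num) hd
  simp only [Int.ofNat_eq_natCast]
  omega

-- Horner fold from an arbitrary accumulator.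
theorem pvHornerShift (l : List Int) (v : Int) :
    l.foldl (fun v d => v * 38 + d) v
      = v * 38 ^ l.length + l.foldl (fun v d => v * 38 + d) 0 := by
  induction l generalizing v with
  | nil => simp
  | cons d t ih =>
    simp only [List.foldl_cons, List.length_cons]
    rw [ih (v * 38 + d), ih (0 * 38 + d)]
    ring

-- A's exponent-tracking positional sum equals the Horner value.
theorem pvAFold (l : List Int) (v : Int) :
    (l.foldl (fun (s : Int × Int) digit => (s.1 + digit * 38 ^ s.2.toNat, s.2 - 1))
        (v, (l.length : Int) - 1)).1
      = v + l.foldl (fun v d => v * 38 + d) 0 := by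
  induction l generalizing v with
  | nil => simp
  | cons d t ih =>
    simp only [List.foldl_cons, List.length_cons, Nat.cast_add, Nat.cast_one,
      add_sub_cancel_right, Int.toNat_natCast]
    rw [ih, pvHornerShift t (0 * 38 + d)]
    ring

theorem pvLNTIB_eq (l : List Int) :
    pvListNumbersToIntInBase l 38 = l.foldl (fun v d => v * 38 + d) 0 := by
  unfold pvListNumbersToIntInBase
  rw [pvAFold l 0, zero_add]

-- A's while-loop produces the base-256 digit list (little-endian) of a nonnegative n
theorem pvNtbLoop_canon (fuel : Nat) (n : Int) (acc : List Int)
    (hn : 0 ≤ n) (hf : n.toNat ≤ fuel) :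
    pvNtbLoop fuel n 256 acc = acc ++ pvCanon n.toNat := by
  induction fuel generalizing n acc with
  | zero =>
    have : n = 0 := by omega
    subst this
    simp [pvNtbLoop, pvCanon]
  | succ f ih =>
    by_cases h0 : n = 0
    · subst h0
      simp [pvNtbLoop, pvCanon]
    · rw [pvNtbLoop, if_neg h0]
      have hpos : 0 < n := lt_of_le_of_ne hn (Ne.symm h0)
      have hdnn : 0 ≤ PySem.Int.floordiv n 256 := by
        rw [PySem.Int.floordiv_eq_ediv_of_pos (by norm_num)]
        exact Int.ediv_nonneg hn (by norm_num)
      have hdec : (PySem.Int.floordiv n 256).toNat ≤ f := by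
        rw [PySem.Int.floordiv_eq_ediv_of_pos (by norm_num)]
        omega
      rw [ih _ _ hdnn hdec, List.append_assoc]
      congr 1
      have hmod : PySem.Int.mod n 256 = Int.ofNat (n.toNat % 256) := by
        rw [PySem.Int.mod_eq_emod_of_pos (by norm_num)]
        simp only [Int.ofNat_eq_natCast]
        omega
      have hdiv : (PySem.Int.floordiv n 256).toNat = n.toNat / 256 := by
        rw [PySem.Int.floordiv_eq_ediv_of_pos (by norm_num)]
        omega
      rw [hmod, hdiv, pvCanon, pvCanon,
        Nat.digits_def' (by norm_num : (1:Nat) < 256) (by omega : 0 < n.toNat)]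
      simp

-- Pad-at-the-back then reverse = reverse then pad-at-the-front.
theorem pvPadRev (ds : List Int) :
    (pvPadBack ds).reverse = pvPadFront ds.reverse := by
  by_cases h : ds.length < 4
  · rw [pvPadBack, if_pos h, pvPadRev (ds ++ [0])]
    conv_rhs => rw [pvPadFront]
    rw [if_pos (by simpa using h), PySem.List.insert_zero]
    congr 1
    simp
  · rw [pvPadBack, if_neg h, pvPadFront, if_neg (by simpa using h)]
  termination_by 4 - ds.length
  decreasing_by simp; omega

-- A's whole tail equals the canonical padded form
theorem pvASide (n : Int) (hn : 0 ≤ n) :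
    pvPadFront (pvNumberToBase n 256) = (pvPadBack (pvCanon n.toNat)).reverse := by
  by_cases h0 : n = 0
  · subst h0
    have e1 : pvPadFront [0] = [0, 0, 0, 0] := by
      rw [pvPadFront, if_pos (by norm_num), PySem.List.insert_zero,
        pvPadFront, if_pos (by norm_num), PySem.List.insert_zero,
        pvPadFront, if_pos (by norm_num), PySem.List.insert_zero,
        pvPadFront, if_neg (by norm_num)]
    have e2 : pvPadBack ([] : List Int) = [0, 0, 0, 0] := by
      rw [pvPadBack, if_pos (by norm_num), pvPadBack, if_pos (by norm_num),
        pvPadBack, if_pos (by norm_num), pvPadBack, if_pos (by norm_num),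
        pvPadBack, if_neg (by norm_num)]
      rfl
    rw [pvNumberToBase, if_pos rfl, e1]
    simp [pvCanon, e2]
  · rw [pvNumberToBase, if_neg h0,
      pvNtbLoop_canon n.toNat n [] hn (le_refl _), List.nil_append, pvPadRev]

-- the main-loop invariant of B
theorem pvFold_inv (code : List Int) (acc : List Int) (carry : Int) (pw : List Int)
    (ha : pvInRange acc) (hpw : pvInRange pw) :
    pvInRange (code.foldl pvStep (acc, carry, pw)).1 ∧
      (code.foldl pvStep (acc, carry, pw)).1.length = acc.length + code.length ∧
      pvVal (code.foldl pvStep (acc, carry, pw)).1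
          + (code.foldl pvStep (acc, carry, pw)).2.1 * 256 ^ (acc.length + code.length)
        = code.foldl (fun v d => v * 38 + d) (pvVal acc + carry * 256 ^ acc.length) ∧
      pvInRange (code.foldl pvStep (acc, carry, pw)).2.2 ∧
      pvVal (code.foldl pvStep (acc, carry, pw)).2.2 = pvVal pw * 38 ^ code.length := by
  induction code generalizing acc carry pw with
  | nil =>
    refine ⟨ha, by simp, by simp, hpw, by simp⟩
  | cons d rest ih =>
    -- one pvStep
    obtain ⟨m1, m2, m3⟩ := pvMulPass_spec acc d ha
    have hmod := pvModRange (carry * 38 + (pvMulPass acc d).2)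
    have hsplit := pvSplit (carry * 38 + (pvMulPass acc d).2)
    set c := carry * 38 + (pvMulPass acc d).2 with hc
    have ha' : pvInRange ((pvMulPass acc d).1 ++ [PySem.Int.mod c 256]) := by
      intro y hy
      rcases List.mem_append.mp hy with hy | hy
      · exact m1 y hy
      · simp only [List.mem_singleton] at hy
        subst hy
        exact hmod
    obtain ⟨q1, q2, q3⟩ := pvMulPass_spec pw 0 hpw
    have hq2 : 0 ≤ (pvMulPass pw 0).2 :=
      pvMulPass_carry_nonneg pw 0 (fun x hx => (hpw x hx).1) (le_refl 0)
    obtain ⟨p1, p2⟩ := pvPushCarry_spec (pvMulPass pw 0).2.toNat (pvMulPass pw 0).2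
      (pvMulPass pw 0).1 hq2 (le_refl _) q1
    have hstep : (d :: rest).foldl pvStep (acc, carry, pw)
        = rest.foldl pvStep ((pvMulPass acc d).1 ++ [PySem.Int.mod c 256],
            PySem.Int.floordiv c 256,
            pvPushCarry (pvMulPass pw 0).2.toNat (pvMulPass pw 0).2 (pvMulPass pw 0).1) := by
      rfl
    rw [hstep]
    obtain ⟨w1, w2, w3, w4, w5⟩ := ih _ (PySem.Int.floordiv c 256) _ ha'
      (fun x hx => p1 x hx)
    have hlen' : ((pvMulPass acc d).1 ++ [PySem.Int.mod c 256]).length = acc.length + 1 := by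
      simp [m2]
    refine ⟨w1, ?_, ?_, w4, ?_⟩
    · rw [w2, hlen']
      simp [List.length_cons]
      omega
    · have hexp : ((pvMulPass acc d).1 ++ [PySem.Int.mod c 256]).length + rest.length
          = acc.length + (d :: rest).length := by
        simp [m2]
        omega
      rw [← hexp, w3, List.foldl_cons]
      congr 1
      rw [pvVal_append, hlen', m2]
      simp only [pvVal, List.foldr_cons, List.foldr_nil]
      have hpow : (256:Int) ^ (acc.length + 1) = 256 ^ acc.length * 256 := by ring
      rw [hpow]
      simp only [pvVal] at m3
      linear_combination (256:Int) ^ acc.length * hsplit + (256:Int) ^ acc.length * hc + m3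
    · rw [w5, p2, q2]
      simp only [pvVal] at q3 ⊢
      have : List.foldr (fun x r => x + 256 * r) 0 (pvMulPass pw 0).1
          + (pvMulPass pw 0).2 * 256 ^ pw.length = 38 * List.foldr (fun x r => x + 256 * r) 0 pw := by
        simpa using q3
      simp only [List.length_cons]
      rw [pow_succ]
      linear_combination 38 ^ rest.length * this

-- ===== VERDICT (by name: the statement is the Claim_ definition above) =====
theorem StargateCodeToIp_spec : Claim_equal_StargateCodeToIp := by
  intro sc _ hpre
  unfold Spec_StargateCodeToIp
  simp only [StargateCodeToIp, StargateCodeToIp_alt, PySem.List.slice_to_neg_one,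
    PySem.List.insert_zero, pvLNTIB_eq]
  set code := sc.dropLast with hcode
  set h := code.foldl (fun v d => v * 38 + d) 0 with hh
  have hpre' : 0 ≤ h := hpre
  set st := code.foldl pvStep ([], 0, [1]) with hst
  obtain ⟨hr, hlen, hv, hpwr, hpwv⟩ := pvFold_inv code [] 0 [1]
    (fun x hx => absurd hx (List.not_mem_nil))
    (by intro x hx; simp at hx; subst hx; norm_num)
  rw [← hst] at hr hlen hv hpwr hpwv
  simp only [List.length_nil, Nat.zero_add, pow_zero] at hlen hv hpwv
  have hv0 : pvVal ([] : List Int) = 0 := rfl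
  rw [hv0] at hv
  norm_num at hv
  rw [← hh] at hv
  have hpw1 : pvVal [1] = 1 := by simp [pvVal]
  rw [hpw1, one_mul] at hpwv
  -- carry is nonnegative at the end of the loop
  have hvlt := pvVal_lt st.1 hr
  have hvnn := pvVal_nonneg st.1 hr
  rw [hlen] at hvlt
  have hcar : 0 ≤ st.2.1 := by
    by_contra hneg
    push Not at hneg
    have h1 : st.2.1 ≤ -1 := by omega
    have hp : (0:Int) < 256 ^ code.length := by positivity
    nlinarith [hv]
  -- normalised, stripped accumulator = canonical digits of h
  obtain ⟨n1, n2⟩ := pvPushCarry_spec st.2.1.toNat st.2.1 st.1 hcar (le_refl _) hr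
  rw [hlen] at n2
  have hn2 : pvVal (pvPushCarry st.2.1.toNat st.2.1 st.1) = h := by rw [n2, hv]
  have hacc0 : pvStrip (pvPushCarry st.2.1.toNat st.2.1 st.1) = pvCanon h.toNat := by
    rw [pvStrip_canon _ n1, hn2]
  set acc0 := pvStrip (pvPushCarry st.2.1.toNat st.2.1 st.1) with hacc0d
  have hlenacc : acc0.length = (Nat.digits 256 h.toNat).length := by
    rw [hacc0, pvCanon, List.length_map]
  have hcast : ((h.toNat : Nat) : Int) = h := Int.toNat_of_nonneg hpre'
  -- the shift test equals "h ≥ 38^5"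
  have hm : ([1, 0, 0, 0, 0, 0] : List Int).foldl (fun v d => v * 38 + d) 0 = 38 ^ 5 := by
    norm_num
  have hbigiff :
      (if 4 < acc0.length then true
       else if acc0.length = 4 then
         decide (79235168 ≤ acc0.reverse.foldl (fun v x => v * 256 + x) 0)
       else false) = true ↔ (38:Int) ^ 5 ≤ h := by
    have hfold : acc0.reverse.foldl (fun v x => v * 256 + x) 0 = ((h.toNat : Nat) : Int) := by
      rw [pvFoldRev, hacc0, pvCanon_val]
    by_cases h4 : 4 < acc0.length
    · rw [if_pos h4]
      have : 256 ^ 4 ≤ h.toNat := by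
        rw [← Nat.lt_digits_length_iff (by norm_num : (1:Nat) < 256), ← hlenacc]
        omega
      constructor
      · intro _
        have : (38:Int) ^ 5 ≤ ((h.toNat : Nat) : Int) := by
          push_cast
          norm_num
          omega
        rw [hcast] at this
        exact this
      · intro _; rfl
    · rw [if_neg h4]
      by_cases h4' : acc0.length = 4
      · rw [if_pos h4', hfold, hcast]
        rw [show (38:Int) ^ 5 = 79235168 by norm_num]
        simp
      · rw [if_neg h4']
        have hle : acc0.length ≤ 3 := by omega
        rw [hlenacc] at hle
        have : h.toNat < 256 ^ 3 := by
          rw [← Nat.digits_length_le_iff (by norm_num : (1:Nat) < 256)]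
          omega
        have hlt : h < 38 ^ 5 := by
          rw [← hcast]
          push_cast
          norm_num
          omega
        simp
        omega
  -- the B-side result list for each case
  have haddval : pvStrip (pvPushCarry (pvAddPass acc0 st.2.2 0).2.toNat
        (pvAddPass acc0 st.2.2 0).2 (pvAddPass acc0 st.2.2 0).1)
      = pvCanon (h + 38 ^ code.length).toNat := by
    have hq01 : (0:Int) ≤ 0 ∧ (0:Int) ≤ 1 := by norm_num
    obtain ⟨a1, a2, a3⟩ := pvAddPass_spec acc0 st.2.2 0
      (by rw [hacc0]; exact pvCanon_inRange _) hpwr (by norm_num)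
    obtain ⟨p1, p2⟩ := pvPushCarry_spec (pvAddPass acc0 st.2.2 0).2.toNat
      (pvAddPass acc0 st.2.2 0).2 (pvAddPass acc0 st.2.2 0).1 a2.1 (le_refl _) a1
    rw [pvStrip_canon _ p1, p2, a3]
    congr 2
    have : pvVal acc0 = h := by
      rw [hacc0, pvCanon_val, hcast]
    rw [this, hpwv]
    ring
  -- put the two sides together
  have hval : ∀ b : Int, (b :: code).foldl (fun v d => v * 38 + d) 0
      = b * 38 ^ code.length + h := by
    intro b
    rw [List.foldl_cons, pvHornerShift]
    simp [hh]
  by_cases h5 : (38 : Int) ^ 5 ≤ h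
  · rw [hm, if_neg (not_lt.mpr h5), hval 1, one_mul]
    rw [if_pos (hbigiff.mpr h5), haddval]
    have hipnn : (0:Int) ≤ 38 ^ code.length + h := by positivity
    have hcomm : (38:Int) ^ code.length + h = h + 38 ^ code.length := by ring
    rw [pvASide _ hipnn, hcomm]
  · rw [hm, if_pos (not_le.mp h5), hval 0, zero_mul, zero_add]
    rw [if_neg (by rw [hbigiff]; exact h5), hacc0]
    rw [pvASide _ hpre']
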